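-- pv_equiv track=rewrite | github.com/NukkadFoods/chotu | mcp/tools/learning_performance_monitor.py | categorize_intent
-- ===== SOURCE A (Python) =====
-- def categorize_intent(intent: str) -> str:
--     """Categorize user intent into broad categories"""
--     intent_lower = intent.lower()
--
--     if any(word in intent_lower for word in ['battery', 'power', 'charge']):
--         return 'system_monitoring'
--     elif any(word in intent_lower for word in ['network', 'connectivity', 'internet']):
--         return 'network_tools'
--     elif any(word in intent_lower for word in ['file', 'folder', 'directory']):
--         return 'file_operations'
--     elif any(word in intent_lower for word in ['music', 'audio', 'sound']):
--         return 'media_control'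
--     elif any(word in intent_lower for word in ['email', 'message', 'communication']):
--         return 'communication'
--     else:
--         return 'other'
-- ===== SOURCE B (Python) =====
-- KEYWORD_PRIORITY = {
--     'battery': 0, 'power': 0, 'charge': 0,
--     'network': 1, 'connectivity': 1, 'internet': 1,
--     'file': 2, 'folder': 2, 'directory': 2,
--     'music': 3, 'audio': 3, 'sound': 3,
--     'email': 4, 'message': 4, 'communication': 4,
-- }
-- CATEGORIES = ['system_monitoring', 'network_tools', 'file_operations',
--               'media_control', 'communication', 'other']
--
-- def categorize_intent(intent: str) -> str:
--     """Categorize user intent into broad categories"""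
--     s = intent.lower()
--     best = 5
--     for i in range(len(s)):
--         for kw, pri in KEYWORD_PRIORITY.items():
--             if pri < best and s.startswith(kw, i):
--                 best = pri
--     return CATEGORIES[best]
-- ===== Notes on version B (the rewrite author's own statement) =====
-- stated objective: alternative
-- what changed: Instead of per-keyword substring searches in an if/elif chain, B makes a single left-to-right scan over the lowercased string, checking each keyword as a prefix at every position and keeping the minimum category priority seen, then indexes an ordered category list.
import Mathlib
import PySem

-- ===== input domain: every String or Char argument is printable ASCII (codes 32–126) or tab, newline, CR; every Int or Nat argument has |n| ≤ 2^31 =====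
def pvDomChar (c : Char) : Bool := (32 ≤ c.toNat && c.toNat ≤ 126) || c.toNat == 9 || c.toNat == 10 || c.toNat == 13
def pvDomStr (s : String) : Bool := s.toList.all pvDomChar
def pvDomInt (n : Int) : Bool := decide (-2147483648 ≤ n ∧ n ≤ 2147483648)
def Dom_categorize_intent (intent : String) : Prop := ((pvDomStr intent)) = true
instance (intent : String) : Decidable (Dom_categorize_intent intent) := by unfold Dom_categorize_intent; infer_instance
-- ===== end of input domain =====

-- B replaces A's per-keyword substring-search if/elif chain by a single positional scan keeping a minimum-priority accumulator (alternative algorithm, same cost).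


-- ===== PORT A =====
def categorize_intent (intent : String) : String :=
  let intent_lower := PySem.Str.lower intent
  if ["battery", "power", "charge"].any (fun w => PySem.Str.isIn w intent_lower) then
    "system_monitoring"
  else if ["network", "connectivity", "internet"].any (fun w => PySem.Str.isIn w intent_lower) then
    "network_tools"
  else if ["file", "folder", "directory"].any (fun w => PySem.Str.isIn w intent_lower) then
    "file_operations"
  else if ["music", "audio", "sound"].any (fun w => PySem.Str.isIn w intent_lower) then
    "media_control"
  else if ["email", "message", "communication"].any (fun w => PySem.Str.isIn w intent_lower) then
    "communication"
  else
    "other"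

-- ===== PORT B =====
def KEYWORD_PRIORITY : List (String × Nat) :=
  [("battery", 0), ("power", 0), ("charge", 0),
   ("network", 1), ("connectivity", 1), ("internet", 1),
   ("file", 2), ("folder", 2), ("directory", 2),
   ("music", 3), ("audio", 3), ("sound", 3),
   ("email", 4), ("message", 4), ("communication", 4)]

def CATEGORIES : List String :=
  ["system_monitoring", "network_tools", "file_operations",
   "media_control", "communication", "other"]

-- the loop 'for i in range(len(s)): for kw, pri in KEYWORD_PRIORITY.items(): …'
-- as structural recursion over the suffixes of s (s.startswith(kw, i) = kw is a prefix of s[i:])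
def bScan : List Char → Nat → Nat
  | [], best => best
  | c :: rest, best =>
      bScan rest (KEYWORD_PRIORITY.foldl
        (fun b p => if p.2 < b ∧ PySem.Chars.startswith (c :: rest) p.1.toList then p.2 else b) best)

def categorize_intent_alt (intent : String) : String :=
  let s := PySem.Chars.lower intent.toList
  CATEGORIES.getD (bScan s 5) "other"

-- ===== PRECONDITION & SPEC =====
def Spec_categorize_intent (intent : String) (out : String) : Prop := out = categorize_intent_alt intent
instance (intent : String) (out : String) : Decidable (Spec_categorize_intent intent out) := by unfold Spec_categorize_intent; infer_instance

-- ===== CLAIM (what is proved, stated in full; the proofs are below) =====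
def Claim_equal_categorize_intent : Prop := ∀ (intent : String), Dom_categorize_intent intent → Spec_categorize_intent intent (categorize_intent intent)

-- ===== LEMMAS AND PROOFS =====

-- class-level hit predicates for the proof only
def classHitIn (kws : List String) (s : List Char) : Bool :=
  kws.any (fun kw => PySem.Chars.isIn kw.toList s)
def classHitAt (kws : List String) (s : List Char) : Bool :=
  kws.any (fun kw => PySem.Chars.startswith s kw.toList)

def K0 : List String := ["battery", "power", "charge"]
def K1 : List String := ["network", "connectivity", "internet"]
def K2 : List String := ["file", "folder", "directory"]
def K3 : List String := ["music", "audio", "sound"]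
def K4 : List String := ["email", "message", "communication"]

-- the chain value of A, as a priority number
def mval (s : List Char) : Nat :=
  if classHitIn K0 s then 0 else if classHitIn K1 s then 1 else if classHitIn K2 s then 2
  else if classHitIn K3 s then 3 else if classHitIn K4 s then 4 else 5

-- the best priority hit at the head position
def hval (s : List Char) : Nat :=
  if classHitAt K0 s then 0 else if classHitAt K1 s then 1 else if classHitAt K2 s then 2
  else if classHitAt K3 s then 3 else if classHitAt K4 s then 4 else 5

lemma isIn_cons (kw : List Char) (c : Char) (rest : List Char) :
    PySem.Chars.isIn kw (c :: rest)
      = (PySem.Chars.startswith (c :: rest) kw || PySem.Chars.isIn kw rest) := by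
  rw [Bool.eq_iff_iff]
  simp [PySem.Chars.isIn_iff_infix, PySem.Chars.startswith_iff, List.infix_cons_iff]

lemma classHitIn_cons (kws : List String) (c : Char) (rest : List Char) :
    classHitIn kws (c :: rest) = (classHitAt kws (c :: rest) || classHitIn kws rest) := by
  induction kws with
  | nil => rfl
  | cons k ks ih =>
      simp only [classHitIn, classHitAt, List.any_cons] at *
      rw [isIn_cons, ih]
      cases PySem.Chars.startswith (c :: rest) k.toList <;>
        cases PySem.Chars.isIn k.toList rest <;> simp

lemma mval_cons (c : Char) (rest : List Char) :
    mval (c :: rest) = min (hval (c :: rest)) (mval rest) := by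
  unfold mval hval
  rw [classHitIn_cons K0, classHitIn_cons K1, classHitIn_cons K2,
      classHitIn_cons K3, classHitIn_cons K4]
  generalize classHitAt K0 (c :: rest) = p0
  generalize classHitAt K1 (c :: rest) = p1
  generalize classHitAt K2 (c :: rest) = p2
  generalize classHitAt K3 (c :: rest) = p3
  generalize classHitAt K4 (c :: rest) = p4
  generalize classHitIn K0 rest = q0
  generalize classHitIn K1 rest = q1
  generalize classHitIn K2 rest = q2
  generalize classHitIn K3 rest = q3
  generalize classHitIn K4 rest = q4
  revert p0 p1 p2 p3 p4 q0 q1 q2 q3 q4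
  decide

-- the inner foldl over one priority class
lemma class_foldl (kws : List String) (i : Nat) (s : List Char) :
    ∀ b : Nat, (kws.map (fun k => (k, i))).foldl
        (fun b p => if p.2 < b ∧ PySem.Chars.startswith s p.1.toList then p.2 else b) b
      = if i < b ∧ classHitAt kws s then i else b := by
  induction kws with
  | nil => intro b; simp [classHitAt]
  | cons k ks ih =>
      intro b
      simp only [List.map_cons, List.foldl_cons]
      rw [ih]
      simp only [classHitAt, List.any_cons]
      by_cases hk : PySem.Chars.startswith s k.toList = true <;>
        by_cases hks : (ks.any fun kw => PySem.Chars.startswith s kw.toList) = true <;>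
        simp [hk, hks] <;> (try split_ifs) <;> omega

lemma KP_eq : KEYWORD_PRIORITY
    = (K0.map (fun k => (k, 0))) ++ (K1.map (fun k => (k, 1))) ++ (K2.map (fun k => (k, 2)))
      ++ (K3.map (fun k => (k, 3))) ++ (K4.map (fun k => (k, 4))) := rfl

-- the inner foldl over KEYWORD_PRIORITY computes min best (hval s)
lemma inner_foldl (s : List Char) (best : Nat) (hb : best ≤ 5) :
    KEYWORD_PRIORITY.foldl
        (fun b p => if p.2 < b ∧ PySem.Chars.startswith s p.1.toList then p.2 else b) best
      = min best (hval s) := by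
  rw [KP_eq]
  simp only [List.foldl_append]
  rw [class_foldl K0 0 s, class_foldl K1 1 s, class_foldl K2 2 s, class_foldl K3 3 s,
      class_foldl K4 4 s]
  unfold hval
  by_cases h0 : classHitAt K0 s = true <;> by_cases h1 : classHitAt K1 s = true <;>
  by_cases h2 : classHitAt K2 s = true <;> by_cases h3 : classHitAt K3 s = true <;>
  by_cases h4 : classHitAt K4 s = true <;>
  simp [h0, h1, h2, h3, h4] <;> (try split_ifs) <;> omega

lemma mval_nil : mval [] = 5 := by decide

lemma bScan_eq (s : List Char) : ∀ best : Nat, best ≤ 5 → bScan s best = min best (mval s) := by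
  induction s with
  | nil => intro best h; rw [mval_nil]; simp [bScan]; omega
  | cons c rest ih =>
      intro best h
      rw [bScan, inner_foldl _ _ h, ih _ (by omega), mval_cons]
      omega

-- ===== VERDICT (by name: the statement is the Claim_ definition above) =====
theorem categorize_intent_spec : Claim_equal_categorize_intent := by
  intro intent _
  unfold Spec_categorize_intent categorize_intent categorize_intent_alt
  have hA : ∀ w : String, PySem.Str.isIn w (PySem.Str.lower intent)
      = PySem.Chars.isIn w.toList (PySem.Chars.lower intent.toList) := by
    intro w; simp [PySem.Str.isIn]
  simp only [List.any_cons, List.any_nil, hA, Bool.or_false]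
  rw [bScan_eq _ 5 (le_refl 5)]
  unfold mval classHitIn K0 K1 K2 K3 K4
  simp only [List.any_cons, List.any_nil, Bool.or_false]
  generalize PySem.Chars.lower intent.toList = s
  generalize (PySem.Chars.isIn "battery".toList s || (PySem.Chars.isIn "power".toList s || PySem.Chars.isIn "charge".toList s)) = q0
  generalize (PySem.Chars.isIn "network".toList s || (PySem.Chars.isIn "connectivity".toList s || PySem.Chars.isIn "internet".toList s)) = q1
  generalize (PySem.Chars.isIn "file".toList s || (PySem.Chars.isIn "folder".toList s || PySem.Chars.isIn "directory".toList s)) = q2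
  generalize (PySem.Chars.isIn "music".toList s || (PySem.Chars.isIn "audio".toList s || PySem.Chars.isIn "sound".toList s)) = q3
  generalize (PySem.Chars.isIn "email".toList s || (PySem.Chars.isIn "message".toList s || PySem.Chars.isIn "communication".toList s)) = q4
  revert q0 q1 q2 q3 q4
  decide
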